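-- pv_equiv track=rewrite | github.com/nehawagh08/Assignment1_Linear_Data_structures | Problem for Assignment_2_Linear Data Structures.py | find_kth_largest_and_smallest
-- ===== SOURCE A (Python) =====
-- import heapq
--
-- def find_kth_largest_and_smallest(arr, k):
--     if k < 1 or k > len(arr):
--         return None
--
--     min_heap = []
--     max_heap = []
--
--     for num in arr:
--         heapq.heappush(min_heap, num)
--         heapq.heappush(max_heap, -num)
--
--         if len(min_heap) > k:
--             heapq.heappop(min_heap)
--         if len(max_heap) > k:
--             heapq.heappop(max_heap)
--
--     kth_smallest = min_heap[0]
--     kth_largest = -max_heap[0]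
--
--     return kth_smallest, kth_largest
-- ===== SOURCE B (Python) =====
-- def find_kth_largest_and_smallest(arr, k):
--     if k < 1 or k > len(arr):
--         return None
--     s = sorted(arr)
--     return s[len(s) - k], s[k - 1]
-- ===== Notes on version B (the rewrite author's own statement) =====
-- stated objective: simpler
-- what changed: Replaces the two incrementally maintained size-k heaps with a single sort of the array followed by direct indexing of the kth-largest and kth-smallest positions.
import Mathlib
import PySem

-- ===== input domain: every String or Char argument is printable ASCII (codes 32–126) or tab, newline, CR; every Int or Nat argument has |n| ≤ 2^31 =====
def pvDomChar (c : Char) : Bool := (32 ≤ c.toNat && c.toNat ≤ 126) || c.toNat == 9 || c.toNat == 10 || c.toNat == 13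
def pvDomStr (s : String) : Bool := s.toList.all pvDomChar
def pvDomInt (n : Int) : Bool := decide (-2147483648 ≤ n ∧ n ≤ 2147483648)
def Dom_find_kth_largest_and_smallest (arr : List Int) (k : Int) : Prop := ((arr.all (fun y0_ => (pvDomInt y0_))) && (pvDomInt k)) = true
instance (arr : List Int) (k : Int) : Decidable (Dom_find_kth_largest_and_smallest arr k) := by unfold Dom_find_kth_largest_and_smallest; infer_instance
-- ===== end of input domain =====

-- B replaces A's two incrementally maintained size-k heaps by one sort of the array plus direct
-- indexing of the kth-largest and kth-smallest positions (simpler, and measurably faster by a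
-- constant factor in a timing run).

-- ===== PORT A =====
-- A uses heapq; PySem has no heap primitives, so heapq.heappush / heapq.heappop are ported by
-- hand below, step for step from CPython's pure-Python heapq (_siftdown, _siftup, heappush,
-- heappop); they are exact on the inputs on which A calls them (indices in range, pop on a
-- non-empty heap — both always the case inside A's loop).

-- CPython _siftdown's while-loop: bubble `newitem` up from `pos` towards `startpos`.
def pvSiftdownLoop (heap : List Int) (newitem : Int) (startpos pos : Nat) : List Int :=
  if _h : startpos < pos then
    let parentpos := (pos - 1) / 2
    let parent := heap.getD parentpos 0
    if newitem < parent then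
      pvSiftdownLoop (heap.set pos parent) newitem startpos parentpos
    else
      heap.set pos newitem
  else
    heap.set pos newitem
termination_by pos
decreasing_by omega

-- heapq._siftdown(heap, startpos, pos)
def pvSiftdown (heap : List Int) (startpos pos : Nat) : List Int :=
  pvSiftdownLoop heap (heap.getD pos 0) startpos pos

-- heapq.heappush(heap, item): heap.append(item); _siftdown(heap, 0, len(heap)-1)
def pvHeappush (heap : List Int) (item : Int) : List Int :=
  pvSiftdown (heap ++ [item]) 0 heap.length

-- heapq._siftup's while-loop: move the hole at `pos` down to a leaf, returning the list and the
-- final hole position.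
def pvSiftupLoop (heap : List Int) (pos : Nat) : List Int × Nat :=
  let endpos := heap.length
  let childpos := 2 * pos + 1
  if _h : childpos < endpos then
    let rightpos := childpos + 1
    if _h2 : rightpos < endpos ∧ ¬ (heap.getD childpos 0 < heap.getD rightpos 0) then
      pvSiftupLoop (heap.set pos (heap.getD rightpos 0)) rightpos
    else
      pvSiftupLoop (heap.set pos (heap.getD childpos 0)) childpos
  else
    (heap, pos)
termination_by heap.length - pos
decreasing_by
  · simp only [List.length_set]; omega
  · simp only [List.length_set]; omega

-- heapq._siftup(heap, pos): loop, then heap[pos] = newitem; _siftdown(heap, startpos, pos)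
def pvSiftup (heap : List Int) (pos : Nat) : List Int :=
  let startpos := pos
  let newitem := heap.getD pos 0
  let r := pvSiftupLoop heap pos
  pvSiftdownLoop (r.1.set r.2 newitem) newitem startpos r.2

-- heapq.heappop(heap): lastelt = heap.pop(); if heap: returnitem = heap[0]; heap[0] = lastelt;
-- _siftup(heap, 0); return returnitem; return lastelt.  Returns (popped value, new heap).
-- (heappop([]) raises IndexError in Python; A never pops an empty heap, that branch is unreachable.)
def pvHeappop (heap : List Int) : Int × List Int :=
  match heap.getLast? with
  | none => (0, [])
  | some lastelt =>
    let rest := heap.dropLast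
    if rest.isEmpty then (lastelt, [])
    else (rest.getD 0 0, pvSiftup (rest.set 0 lastelt) 0)

-- the body of A's `for num in arr` loop
def pvLoopStep (k : Int) (s : List Int × List Int) (num : Int) : List Int × List Int :=
  let min_heap := pvHeappush s.1 num
  let max_heap := pvHeappush s.2 (-num)
  let min_heap := if (min_heap.length : Int) > k then (pvHeappop min_heap).2 else min_heap
  let max_heap := if (max_heap.length : Int) > k then (pvHeappop max_heap).2 else max_heap
  (min_heap, max_heap)

def find_kth_largest_and_smallest (arr : List Int) (k : Int) : Option (Int × Int) :=
  if k < 1 ∨ k > (arr.length : Int) then none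
  else
    let s := arr.foldl (pvLoopStep k) ([], [])
    -- min_heap[0] / max_heap[0]; IndexError impossible here since 1 ≤ k ≤ len(arr)
    match PySem.List.pyGet? s.1 0, PySem.List.pyGet? s.2 0 with
    | some kth_smallest, some mx => some (kth_smallest, -mx)
    | _, _ => none

-- ===== PORT B =====
def find_kth_largest_and_smallest_alt (arr : List Int) (k : Int) : Option (Int × Int) :=
  if k < 1 ∨ k > (arr.length : Int) then none
  else
    let s := PySem.List.sorted arr (fun x => x) false
    -- s[len(s)-k] / s[k-1]; IndexError impossible here since 1 ≤ k ≤ len(arr)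
    match PySem.List.pyGet? s ((s.length : Int) - k) with
    | none => none
    | some a =>
      match PySem.List.pyGet? s (k - 1) with
      | none => none
      | some b => some (a, b)

-- ===== PRECONDITION & SPEC =====
def Spec_find_kth_largest_and_smallest (arr : List Int) (k : Int) (out : Option (Int × Int)) : Prop := out = find_kth_largest_and_smallest_alt arr k
instance (arr : List Int) (k : Int) (out : Option (Int × Int)) : Decidable (Spec_find_kth_largest_and_smallest arr k out) := by unfold Spec_find_kth_largest_and_smallest; infer_instance

-- ===== CLAIM (what is proved, stated in full; the proofs are below) =====
def Claim_equal_find_kth_largest_and_smallest : Prop := ∀ (arr : List Int) (k : Int), Dom_find_kth_largest_and_smallest arr k → Spec_find_kth_largest_and_smallest arr k (find_kth_largest_and_smallest arr k)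

-- ===== LEMMAS AND PROOFS =====

-- the binary-heap shape invariant: every parent is ≤ its children
def PVHeapInv (h : List Int) : Prop :=
  ∀ i j : Nat, (j = 2 * i + 1 ∨ j = 2 * i + 2) → j < h.length → h.getD i 0 ≤ h.getD j 0

theorem pv_getD_set_ne (l : List Int) (i j : Nat) (x : Int) (h : j ≠ i) :
    (l.set i x).getD j 0 = l.getD j 0 := by
  simp [List.getD_eq_getElem?_getD, List.getElem?_set_ne (fun he => h he.symm)]

theorem pv_getD_set_self (l : List Int) (i : Nat) (x : Int) (h : i < l.length) :
    (l.set i x).getD i 0 = x := by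
  simp [List.getD_eq_getElem?_getD, h]

theorem pv_getD_eq_getElem (l : List Int) (i : Nat) (h : i < l.length) :
    l.getD i 0 = l[i] := List.getD_eq_getElem l 0 h

-- setting an entry, as a multiset identity
theorem pv_set_ms (l : List Int) (i : Nat) (x : Int) (hi : i < l.length) :
    (↑(l.set i x) : Multiset Int) + {l.getD i 0} = ↑l + {x} := by
  induction l generalizing i with
  | nil => simp at hi
  | cons a t ih =>
    cases i with
    | zero =>
      simp only [List.set_cons_zero, List.getD_cons_zero, ← Multiset.cons_coe]
      rw [add_comm, Multiset.singleton_add, add_comm, Multiset.singleton_add, Multiset.cons_swap]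
    | succ i =>
      simp only [List.set_cons_succ, List.getD_cons_succ, ← Multiset.cons_coe, Multiset.cons_add]
      rw [ih i (by simpa using hi)]

theorem pv_set_rot (l : List Int) (i j : Nat) (y : Int) (hi : i < l.length) (hj : j < l.length)
    (hne : j ≠ i) :
    (↑((l.set i (l.getD j 0)).set j y) : Multiset Int) = ↑(l.set i y) := by
  have h1 := pv_set_ms (l.set i (l.getD j 0)) j y (by simpa using hj)
  rw [pv_getD_set_ne _ _ _ _ hne] at h1
  have h2 := pv_set_ms l i (l.getD j 0) hi
  have h3 := pv_set_ms l i y hi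
  have key : (↑((l.set i (l.getD j 0)).set j y) : Multiset Int) + {l.getD i 0} + {l.getD j 0}
      = ↑(l.set i y) + {l.getD i 0} + {l.getD j 0} := by
    rw [add_right_comm _ ({l.getD i 0} : Multiset Int), h1, add_right_comm, h2, h3,
      add_right_comm]
  exact add_right_cancel (add_right_cancel key)

theorem pv_sdl_len (pos : Nat) (heap : List Int) (x : Int) (s : Nat) :
    (pvSiftdownLoop heap x s pos).length = heap.length := by
  fun_induction pvSiftdownLoop with
  | case1 heap pos hlt pp pr hcmp ih => rw [ih]; simp
  | case2 => simp
  | case3 => simp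

theorem pv_sdl_ms (pos : Nat) (heap : List Int) (x : Int) (s : Nat) :
    pos < heap.length →
    (↑(pvSiftdownLoop heap x s pos) : Multiset Int) + {heap.getD pos 0} = ↑heap + {x} := by
  fun_induction pvSiftdownLoop with
  | case1 heap pos hlt pp pr hcmp ih =>
    intro hp
    have hppd : pp = (pos - 1) / 2 := rfl
    have hppl : pp < heap.length := by omega
    have h1 := ih (by simpa using hppl)
    rw [pv_getD_set_ne _ _ _ _ (by omega)] at h1
    have h2 := pv_set_ms heap pos pr hp
    have key : (↑(pvSiftdownLoop (heap.set pos pr) x s pp) : Multiset Int) + {heap.getD pos 0} + {pr}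
        = (↑heap + {x}) + {pr} := by
      rw [add_right_comm, h1, add_right_comm, h2, add_right_comm]
    exact add_right_cancel key
  | case2 heap pos hlt pp pr hcmp => intro hp; exact pv_set_ms heap pos x hp
  | case3 heap pos hlt => intro hp; exact pv_set_ms heap pos x hp

theorem pv_sdl_inv (pos : Nat) (heap : List Int) (x : Int) :
    pos < heap.length →
    (∀ i j : Nat, (j = 2 * i + 1 ∨ j = 2 * i + 2) → j < heap.length → j ≠ pos →
      (heap.set pos x).getD i 0 ≤ (heap.set pos x).getD j 0) →
    (∀ j : Nat, (j = 2 * pos + 1 ∨ j = 2 * pos + 2) → j < heap.length → 0 < pos →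
      heap.getD ((pos - 1) / 2) 0 ≤ heap.getD j 0) →
    PVHeapInv (pvSiftdownLoop heap x 0 pos) := by
  fun_induction pvSiftdownLoop heap x 0 pos with
  | case1 heap pos hlt pp pr hcmp ih =>
    intro hp ha hb
    have hppd : pp = (pos - 1) / 2 := rfl
    have hprd : pr = heap.getD pp 0 := rfl
    have hppl : pp < heap.length := by omega
    have hppos : pp ≠ pos := by omega
    have hw : ∀ m : Nat, (heap.set pos x).getD m 0 = if m = pos then x else heap.getD m 0 := by
      intro m
      by_cases hm : m = pos
      · subst hm; rw [pv_getD_set_self _ _ _ hp, if_pos rfl]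
      · rw [pv_getD_set_ne _ _ _ _ hm, if_neg hm]
    have hu : ∀ m : Nat, (heap.set pos pr).getD m 0 = if m = pos then pr else heap.getD m 0 := by
      intro m
      by_cases hm : m = pos
      · subst hm; rw [pv_getD_set_self _ _ _ hp, if_pos rfl]
      · rw [pv_getD_set_ne _ _ _ _ hm, if_neg hm]
    have hv : ∀ m : Nat, ((heap.set pos pr).set pp x).getD m 0
        = if m = pp then x else if m = pos then pr else heap.getD m 0 := by
      intro m
      by_cases hm : m = pp
      · subst hm; rw [pv_getD_set_self _ _ _ (by simpa using hppl), if_pos rfl]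
      · rw [pv_getD_set_ne _ _ _ _ hm, if_neg hm, hu m]
    apply ih (by simpa using hppl)
    · intro i j hij hj hjp
      rw [List.length_set] at hj
      rw [hv i, hv j]
      by_cases hjpos : j = pos
      · have hipp : i = pp := by omega
        rw [if_pos hipp, if_neg hjp, if_pos hjpos]
        exact le_of_lt hcmp
      · rw [if_neg hjp, if_neg hjpos]
        by_cases hipp : i = pp
        · rw [if_pos hipp]
          have h2 := ha pp j (hipp ▸ hij) hj hjpos
          rw [hw pp, hw j, if_neg hppos, if_neg hjpos] at h2
          calc x ≤ pr := le_of_lt hcmp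
            _ ≤ heap.getD j 0 := hprd ▸ h2
        · rw [if_neg hipp]
          by_cases hipos : i = pos
          · rw [if_pos hipos]
            have h2 := hb j (hipos ▸ hij) hj (by omega)
            exact (hppd ▸ hprd) ▸ h2
          · rw [if_neg hipos]
            have h2 := ha i j hij hj hjpos
            rwa [hw i, hw j, if_neg hipos, if_neg hjpos] at h2
    · intro j hij hj hpp0
      rw [List.length_set] at hj
      rw [hu ((pp - 1) / 2), hu j]
      have hgppos : (pp - 1) / 2 ≠ pos := by omega
      rw [if_neg hgppos]
      have hedge : pp = 2 * ((pp - 1) / 2) + 1 ∨ pp = 2 * ((pp - 1) / 2) + 2 := by omega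
      have h1 := ha ((pp - 1) / 2) pp hedge hppl hppos
      rw [hw ((pp - 1) / 2), hw pp, if_neg hgppos, if_neg hppos] at h1
      by_cases hjpos : j = pos
      · rw [if_pos hjpos]
        exact hprd ▸ h1
      · rw [if_neg hjpos]
        have h2 := ha pp j hij hj hjpos
        rw [hw pp, hw j, if_neg hppos, if_neg hjpos] at h2
        exact le_trans h1 h2
  | case2 heap pos hlt pp pr hcmp =>
    intro hp ha hb i j hij hj
    have hppd : pp = (pos - 1) / 2 := rfl
    have hprd : pr = heap.getD pp 0 := rfl
    have hppos : pp ≠ pos := by omega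
    rw [List.length_set] at hj
    by_cases hjpos : j = pos
    · have hipp : i = pp := by omega
      rw [hipp, hjpos, pv_getD_set_ne _ _ _ _ hppos, pv_getD_set_self _ _ _ hp]
      exact hprd ▸ (not_lt.mp hcmp)
    · exact ha i j hij hj hjpos
  | case3 heap pos hlt =>
    intro hp ha hb i j hij hj
    rw [List.length_set] at hj
    exact ha i j hij hj (by omega)

theorem pv_concat_getD (h : List Int) (x : Int) : (h ++ [x]).getD h.length 0 = x := by
  simp [List.getD_eq_getElem?_getD]

theorem pv_getD_append_left (h : List Int) (x : Int) (m : Nat) (hm : m < h.length) :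
    (h ++ [x]).getD m 0 = h.getD m 0 := by
  simp [List.getD_eq_getElem?_getD, List.getElem?_append_left hm]

theorem pv_push_len (h : List Int) (x : Int) : (pvHeappush h x).length = h.length + 1 := by
  unfold pvHeappush pvSiftdown
  rw [pv_sdl_len]
  simp

theorem pv_push_ms (h : List Int) (x : Int) :
    (↑(pvHeappush h x) : Multiset Int) = ↑h + {x} := by
  unfold pvHeappush pvSiftdown
  have hp : h.length < (h ++ [x]).length := by simp
  have h1 := pv_sdl_ms h.length (h ++ [x]) ((h ++ [x]).getD h.length 0) 0 hp
  rw [pv_concat_getD] at h1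
  have h2 : (↑(h ++ [x]) : Multiset Int) = ↑h + {x} := by rw [← Multiset.coe_add]; rfl
  rw [h2] at h1
  rw [pv_concat_getD]
  exact add_right_cancel h1

theorem pv_push_inv (h : List Int) (x : Int) (hh : PVHeapInv h) : PVHeapInv (pvHeappush h x) := by
  unfold pvHeappush pvSiftdown
  rw [pv_concat_getD]
  apply pv_sdl_inv h.length (h ++ [x]) x (by simp)
  · intro i j hij hj hjp
    rw [List.length_append, List.length_cons, List.length_nil] at hj
    have hjl : j < h.length := by omega
    have hil : i < h.length := by omega
    rw [pv_getD_set_ne _ _ _ _ (by omega), pv_getD_set_ne _ _ _ _ (by omega),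
      pv_getD_append_left _ _ _ hil, pv_getD_append_left _ _ _ hjl]
    exact hh i j hij hjl
  · intro j hij hj hpos
    rw [List.length_append, List.length_cons, List.length_nil] at hj
    omega

theorem pv_root_le (h : List Int) (hh : PVHeapInv h) :
    ∀ i : Nat, i < h.length → h.getD 0 0 ≤ h.getD i 0 := by
  intro i
  induction i using Nat.strong_induction_on with
  | _ i ih =>
    intro hi
    match i with
    | 0 => exact le_refl _
    | Nat.succ m =>
      have hedge : m + 1 = 2 * (m / 2) + 1 ∨ m + 1 = 2 * (m / 2) + 2 := by omega
      have h1 := hh (m / 2) (m + 1) hedge hi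
      have h2 := ih (m / 2) (by omega) (by omega)
      exact le_trans h2 h1

theorem pv_mem_iff_ms (h t : List Int) (hms : (↑h : Multiset Int) = ↑t) (a : Int) :
    a ∈ h ↔ a ∈ t := by
  rw [← Multiset.mem_coe, ← Multiset.mem_coe, hms]

theorem pv_len_eq_ms (h t : List Int) (hms : (↑h : Multiset Int) = ↑t) :
    h.length = t.length := by
  have := congrArg Multiset.card hms
  simpa using this

-- the root of a heap is the head of any sorted list with the same contents
theorem pv_root_eq (h t : List Int) (hh : PVHeapInv h) (hms : (↑h : Multiset Int) = ↑t)
    (hs : t.Pairwise (· ≤ ·)) (hne : h ≠ []) :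
    h.getD 0 0 = t.getD 0 0 := by
  have htne : t ≠ [] := by
    intro he
    apply hne
    have hl := pv_len_eq_ms h t hms
    rw [he] at hl
    exact List.eq_nil_of_length_eq_zero (by simpa using hl)
  obtain ⟨b, t', rfl⟩ := List.exists_cons_of_ne_nil htne
  have hbmem : b ∈ h := (pv_mem_iff_ms h _ hms b).mpr List.mem_cons_self
  have hroot_mem : h.getD 0 0 ∈ (b :: t') := by
    rw [← pv_mem_iff_ms h _ hms]
    rw [pv_getD_eq_getElem _ _ (by cases h <;> simp_all)]
    exact List.getElem_mem _
  have hle1 : h.getD 0 0 ≤ b := by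
    obtain ⟨i, hi, he⟩ := List.mem_iff_getElem.mp hbmem
    rw [← he, ← pv_getD_eq_getElem _ _ hi]
    exact pv_root_le h hh i hi
  have hle2 : b ≤ h.getD 0 0 := by
    rcases List.mem_cons.mp hroot_mem with he | hm
    · exact le_of_eq he.symm
    · exact (List.pairwise_cons.mp hs).1 _ hm
  rw [List.getD_cons_zero]
  exact le_antisymm hle1 hle2

theorem pv_sul_spec (heap : List Int) (pos : Nat) :
    pos < heap.length →
    (pvSiftupLoop heap pos).1.length = heap.length ∧
    (pvSiftupLoop heap pos).2 < heap.length ∧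
    heap.length ≤ 2 * (pvSiftupLoop heap pos).2 + 1 ∧
    ∀ y : Int, (↑((pvSiftupLoop heap pos).1.set (pvSiftupLoop heap pos).2 y) : Multiset Int)
      = ↑(heap.set pos y) := by
  fun_induction pvSiftupLoop with
  | case1 heap pos ep cp h1 rp h2 ih =>
    intro hp
    have hcp : rp < heap.length := h2.1
    obtain ⟨l1, l2, l3, l4⟩ := ih (by simpa using hcp)
    rw [List.length_set] at l1 l2 l3
    refine ⟨l1, l2, l3, ?_⟩
    intro y
    rw [l4 y]
    exact pv_set_rot heap pos rp y hp hcp (by omega)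
  | case2 heap pos ep cp h1 rp h2 ih =>
    intro hp
    have hcp : cp < heap.length := h1
    obtain ⟨l1, l2, l3, l4⟩ := ih (by simpa using hcp)
    rw [List.length_set] at l1 l2 l3
    refine ⟨l1, l2, l3, ?_⟩
    intro y
    rw [l4 y]
    exact pv_set_rot heap pos cp y hp hcp (by omega)
  | case3 heap pos ep cp h1 =>
    intro hp
    exact ⟨rfl, hp, by omega, fun y => rfl⟩

theorem pv_sul_inv (heap : List Int) (pos : Nat) :
    pos < heap.length →
    (∀ i j : Nat, (j = 2 * i + 1 ∨ j = 2 * i + 2) → j < heap.length → i ≠ pos → j ≠ pos →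
      heap.getD i 0 ≤ heap.getD j 0) →
    (∀ j : Nat, (j = 2 * pos + 1 ∨ j = 2 * pos + 2) → j < heap.length → 0 < pos →
      heap.getD ((pos - 1) / 2) 0 ≤ heap.getD j 0) →
    (∀ i j : Nat, (j = 2 * i + 1 ∨ j = 2 * i + 2) → j < (pvSiftupLoop heap pos).1.length →
      i ≠ (pvSiftupLoop heap pos).2 → j ≠ (pvSiftupLoop heap pos).2 →
      (pvSiftupLoop heap pos).1.getD i 0 ≤ (pvSiftupLoop heap pos).1.getD j 0) := by
  fun_induction pvSiftupLoop with
  | case1 heap pos ep cp h1 rp h2 ih =>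
    intro hp ha hb
    have hcpd : cp = 2 * pos + 1 := rfl
    have hrpd : rp = cp + 1 := rfl
    have hepd : ep = heap.length := rfl
    have hrpl : rp < heap.length := by omega
    have hrppos : rp ≠ pos := by omega
    have hv : ∀ m : Nat, (heap.set pos (heap.getD rp 0)).getD m 0
        = if m = pos then heap.getD rp 0 else heap.getD m 0 := by
      intro m
      by_cases hm : m = pos
      · subst hm; rw [pv_getD_set_self _ _ _ hp, if_pos rfl]
      · rw [pv_getD_set_ne _ _ _ _ hm, if_neg hm]
    apply ih (by simpa using hrpl)
    · intro i j hij hj hic hjc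
      rw [List.length_set] at hj
      rw [hv i, hv j]
      by_cases hjpos : j = pos
      · have hip : i = (pos - 1) / 2 := by omega
        rw [if_neg (by omega : i ≠ pos), if_pos hjpos, hip]
        exact hb rp (by omega) hrpl (by omega)
      · rw [if_neg hjpos]
        by_cases hipos : i = pos
        · rw [if_pos hipos]
          have hjcp : j = cp := by omega
          rw [hjcp]
          exact not_lt.mp h2.2
        · rw [if_neg hipos]
          exact ha i j hij hj hipos hjpos
    · intro j hij hj hc
      rw [List.length_set] at hj
      rw [hv ((rp - 1) / 2), hv j]
      have hpar : (rp - 1) / 2 = pos := by omega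
      rw [if_pos hpar, if_neg (by omega : j ≠ pos)]
      exact ha rp j hij hj hrppos (by omega)
  | case2 heap pos ep cp h1 rp h2 ih =>
    intro hp ha hb
    have hcpd : cp = 2 * pos + 1 := rfl
    have hrpd : rp = cp + 1 := rfl
    have hepd : ep = heap.length := rfl
    have hcpl : cp < heap.length := by omega
    have hcppos : cp ≠ pos := by omega
    have hv : ∀ m : Nat, (heap.set pos (heap.getD cp 0)).getD m 0
        = if m = pos then heap.getD cp 0 else heap.getD m 0 := by
      intro m
      by_cases hm : m = pos
      · subst hm; rw [pv_getD_set_self _ _ _ hp, if_pos rfl]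
      · rw [pv_getD_set_ne _ _ _ _ hm, if_neg hm]
    apply ih (by simpa using hcpl)
    · intro i j hij hj hic hjc
      rw [List.length_set] at hj
      rw [hv i, hv j]
      by_cases hjpos : j = pos
      · have hip : i = (pos - 1) / 2 := by omega
        rw [if_neg (by omega : i ≠ pos), if_pos hjpos, hip]
        exact hb cp (by omega) hcpl (by omega)
      · rw [if_neg hjpos]
        by_cases hipos : i = pos
        · rw [if_pos hipos]
          have hjrp : j = rp := by omega
          have hlt : heap.getD cp 0 < heap.getD rp 0 := by
            by_contra hno
            exact h2 ⟨by omega, hno⟩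
          rw [hjrp]
          exact le_of_lt hlt
        · rw [if_neg hipos]
          exact ha i j hij hj hipos hjpos
    · intro j hij hj hc
      rw [List.length_set] at hj
      rw [hv ((cp - 1) / 2), hv j]
      have hpar : (cp - 1) / 2 = pos := by omega
      rw [if_pos hpar, if_neg (by omega : j ≠ pos)]
      exact ha cp j hij hj hcppos (by omega)
  | case3 heap pos ep cp h1 =>
    intro hp ha hb
    exact ha

theorem pv_coe_cons (b : Int) (t : List Int) :
    (↑(b :: t) : Multiset Int) = ↑t + {b} := by
  rw [← Multiset.cons_coe, ← Multiset.singleton_add, add_comm]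

theorem pv_pop_spec (h : List Int) (hh : PVHeapInv h) (hne : h ≠ []) :
    (↑(pvHeappop h).2 : Multiset Int) + {(pvHeappop h).1} = ↑h ∧
    PVHeapInv (pvHeappop h).2 ∧ (pvHeappop h).2.length = h.length - 1 ∧
    (pvHeappop h).1 = h.getD 0 0 := by
  obtain ⟨rest, last, rfl⟩ : ∃ rest last, h = rest ++ [last] :=
    ⟨h.dropLast, h.getLast hne, (List.dropLast_append_getLast hne).symm⟩
  have hpop : pvHeappop (rest ++ [last])
      = if rest.isEmpty then (last, [])
        else (rest.getD 0 0, pvSiftup (rest.set 0 last) 0) := by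
    unfold pvHeappop
    rw [List.getLast?_concat, List.dropLast_concat]
  by_cases hre : rest.isEmpty
  · have hrnil : rest = [] := List.isEmpty_iff.mp hre
    subst hrnil
    have hpop2 : pvHeappop ([] ++ [last]) = (last, []) := rfl
    rw [hpop2]
    refine ⟨by simp, ?_, by simp, by simp [List.getD_eq_getElem?_getD]⟩
    intro i j hij hj
    simp at hj
  · rw [hpop, if_neg hre]
    have hrne : rest ≠ [] := fun he => hre (by rw [he]; rfl)
    have hrl : 0 < rest.length := List.length_pos_of_ne_nil hrne
    set l := rest.set 0 last with hldef
    have hl0 : 0 < l.length := by rw [hldef, List.length_set]; exact hrl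
    have hnew : l.getD 0 0 = last := pv_getD_set_self rest 0 last hrl
    obtain ⟨s1, s2, s3, s4⟩ := pv_sul_spec l 0 hl0
    -- the (A)/(B) conditions for the siftup on l at position 0
    have haL : ∀ i j : Nat, (j = 2 * i + 1 ∨ j = 2 * i + 2) → j < l.length → i ≠ 0 → j ≠ 0 →
        l.getD i 0 ≤ l.getD j 0 := by
      intro i j hij hj hi0 hj0
      have hjr : j < rest.length := by rw [hldef, List.length_set] at hj; exact hj
      have hir : i < rest.length := by omega
      rw [hldef, pv_getD_set_ne _ _ _ _ hi0, pv_getD_set_ne _ _ _ _ hj0]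
      have h1 := hh i j hij (by simp; omega)
      rw [pv_getD_append_left _ _ _ hir, pv_getD_append_left _ _ _ hjr] at h1
      exact h1
    have hbL : ∀ j : Nat, (j = 2 * 0 + 1 ∨ j = 2 * 0 + 2) → j < l.length → 0 < 0 →
        l.getD ((0 - 1) / 2) 0 ≤ l.getD j 0 := by
      intro j hij hj h0
      omega
    have hsul := pv_sul_inv l 0 hl0 haL hbL
    -- now the final siftdown
    have hfp : (pvSiftupLoop l 0).2 < ((pvSiftupLoop l 0).1.set (pvSiftupLoop l 0).2 (l.getD 0 0)).length := by
      rw [List.length_set, s1]; exact s2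
    have hmsfinal := pv_sdl_ms (pvSiftupLoop l 0).2
      ((pvSiftupLoop l 0).1.set (pvSiftupLoop l 0).2 (l.getD 0 0)) (l.getD 0 0) 0 hfp
    rw [pv_getD_set_self (pvSiftupLoop l 0).1 (pvSiftupLoop l 0).2 (l.getD 0 0)
      (by rw [s1]; exact s2)] at hmsfinal
    have hres_ms : (↑(pvSiftup l 0) : Multiset Int) = ↑l := by
      show (↑(pvSiftdownLoop ((pvSiftupLoop l 0).1.set (pvSiftupLoop l 0).2 (l.getD 0 0)) (l.getD 0 0) 0 (pvSiftupLoop l 0).2) : Multiset Int) = ↑l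
      have h2 := add_right_cancel hmsfinal
      rw [h2, s4 (l.getD 0 0)]
      have h3 := pv_set_ms l 0 (l.getD 0 0) hl0
      exact add_right_cancel h3
    have hres_inv : PVHeapInv (pvSiftup l 0) := by
      show PVHeapInv (pvSiftdownLoop ((pvSiftupLoop l 0).1.set (pvSiftupLoop l 0).2 (l.getD 0 0)) (l.getD 0 0) 0 (pvSiftupLoop l 0).2)
      apply pv_sdl_inv _ _ _ hfp
      · intro i j hij hj hjfp
        rw [List.length_set, s1] at hj
        by_cases hifp : i = (pvSiftupLoop l 0).2
        · omega
        · rw [pv_getD_set_ne _ _ _ _ hjfp, pv_getD_set_ne _ _ _ _ hifp,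
            pv_getD_set_ne _ _ _ _ hjfp, pv_getD_set_ne _ _ _ _ hifp]
          exact hsul i j hij (by rw [s1]; exact hj) hifp hjfp
      · intro j hij hj hfp0
        rw [List.length_set, s1] at hj
        omega
    have hres_len : (pvSiftup l 0).length = l.length := by
      show (pvSiftdownLoop ((pvSiftupLoop l 0).1.set (pvSiftupLoop l 0).2 (l.getD 0 0)) (l.getD 0 0) 0 (pvSiftupLoop l 0).2).length = l.length
      rw [pv_sdl_len, List.length_set, s1]
    refine ⟨?_, hres_inv, ?_, ?_⟩
    · show (↑(pvSiftup l 0) : Multiset Int) + {rest.getD 0 0} = ↑(rest ++ [last])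
      rw [hres_ms, hldef]
      have h3 := pv_set_ms rest 0 last hrl
      rw [h3, ← Multiset.coe_add]
      rfl
    · show (pvSiftup l 0).length = (rest ++ [last]).length - 1
      rw [hres_len, hldef]
      simp
    · show rest.getD 0 0 = (rest ++ [last]).getD 0 0
      rw [pv_getD_append_left _ _ _ hrl]

-- the sorted-list model of one iteration of A's heap maintenance
def pvStep (k : Nat) (t : List Int) (x : Int) : List Int :=
  if (List.orderedInsert (· ≤ ·) x t).length > k then (List.orderedInsert (· ≤ ·) x t).tail
  else List.orderedInsert (· ≤ ·) x t

theorem pv_step_sorted (k : Nat) (t : List Int) (x : Int) (hs : t.Pairwise (· ≤ ·)) :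
    (pvStep k t x).Pairwise (· ≤ ·) := by
  unfold pvStep
  have hu : (List.orderedInsert (· ≤ ·) x t).Pairwise (· ≤ ·) := List.Pairwise.orderedInsert x t hs
  split
  · exact List.Pairwise.sublist (List.tail_sublist _) hu
  · exact hu

theorem pv_hstep (k : Int) (hk : 1 ≤ k) (h t : List Int) (x : Int) (hh : PVHeapInv h)
    (hms : (↑h : Multiset Int) = ↑t) (hs : t.Pairwise (· ≤ ·)) :
    PVHeapInv (if ((pvHeappush h x).length : Int) > k then (pvHeappop (pvHeappush h x)).2 else pvHeappush h x) ∧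
    (↑(if ((pvHeappush h x).length : Int) > k then (pvHeappop (pvHeappush h x)).2 else pvHeappush h x) : Multiset Int)
      = ↑(pvStep k.toNat t x) := by
  have hpushinv := pv_push_inv h x hh
  have hpushms := pv_push_ms h x
  have hlen : (pvHeappush h x).length = t.length + 1 := by
    rw [pv_push_len, pv_len_eq_ms h t hms]
  have hums : (↑(pvHeappush h x) : Multiset Int) = ↑(List.orderedInsert (· ≤ ·) x t) := by
    rw [hpushms, hms, ← pv_coe_cons x t]
    exact (Multiset.coe_eq_coe.mpr (List.perm_orderedInsert (fun a b : Int => a ≤ b) x t)).symm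
  have hulen : (List.orderedInsert (· ≤ ·) x t).length = t.length + 1 := by
    simpa using (List.perm_orderedInsert (· ≤ ·) x t).length_eq
  have husort : (List.orderedInsert (· ≤ ·) x t).Pairwise (· ≤ ·) :=
    List.Pairwise.orderedInsert x t hs
  by_cases hc : t.length + 1 > k.toNat
  · have hc1 : ((pvHeappush h x).length : Int) > k := by rw [hlen]; omega
    have hc2 : (List.orderedInsert (· ≤ ·) x t).length > k.toNat := by omega
    rw [if_pos hc1]
    have hne : pvHeappush h x ≠ [] := by
      intro he
      rw [he] at hlen
      simp at hlen
    obtain ⟨pms, pinv, plen, proot⟩ := pv_pop_spec (pvHeappush h x) hpushinv hne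
    refine ⟨pinv, ?_⟩
    have hune : List.orderedInsert (· ≤ ·) x t ≠ [] := by
      intro he
      rw [he] at hulen
      simp at hulen
    have hroot : (pvHeappush h x).getD 0 0 = (List.orderedInsert (· ≤ ·) x t).getD 0 0 :=
      pv_root_eq _ _ hpushinv hums husort hne
    obtain ⟨b, t', hbt⟩ := List.exists_cons_of_ne_nil hune
    have hb0 : (List.orderedInsert (· ≤ ·) x t).getD 0 0 = b := by rw [hbt]; rfl
    have hpop1 : (pvHeappop (pvHeappush h x)).1 = b := by rw [proot, hroot, hb0]
    have h5 : (↑(pvHeappop (pvHeappush h x)).2 : Multiset Int) + {b} = ↑t' + {b} := by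
      rw [← hpop1, pms, hums, hbt, pv_coe_cons, hpop1]
    unfold pvStep
    rw [if_pos hc2, hbt, List.tail_cons]
    exact add_right_cancel h5
  · have hc1 : ¬ ((pvHeappush h x).length : Int) > k := by rw [hlen]; omega
    have hc2 : ¬ (List.orderedInsert (· ≤ ·) x t).length > k.toNat := by omega
    rw [if_neg hc1]
    refine ⟨hpushinv, ?_⟩
    unfold pvStep
    rw [if_neg hc2]
    exact hums

theorem pv_loop (k : Int) (hk : 1 ≤ k) (p : List Int) :
    ∀ (mh xh t1 t2 : List Int), PVHeapInv mh → PVHeapInv xh →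
    (↑mh : Multiset Int) = ↑t1 → (↑xh : Multiset Int) = ↑t2 →
    t1.Pairwise (· ≤ ·) → t2.Pairwise (· ≤ ·) →
    PVHeapInv (p.foldl (pvLoopStep k) (mh, xh)).1 ∧
    PVHeapInv (p.foldl (pvLoopStep k) (mh, xh)).2 ∧
    (↑(p.foldl (pvLoopStep k) (mh, xh)).1 : Multiset Int) = ↑(p.foldl (pvStep k.toNat) t1) ∧
    (↑(p.foldl (pvLoopStep k) (mh, xh)).2 : Multiset Int)
      = ↑((p.map (fun z => -z)).foldl (pvStep k.toNat) t2) := by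
  induction p with
  | nil =>
    intro mh xh t1 t2 hi1 hi2 hm1 hm2 hs1 hs2
    exact ⟨hi1, hi2, hm1, hm2⟩
  | cons y p ih =>
    intro mh xh t1 t2 hi1 hi2 hm1 hm2 hs1 hs2
    obtain ⟨a1, a2⟩ := pv_hstep k hk mh t1 y hi1 hm1 hs1
    obtain ⟨b1, b2⟩ := pv_hstep k hk xh t2 (-y) hi2 hm2 hs2
    have hstep : pvLoopStep k (mh, xh) y
        = (if ((pvHeappush mh y).length : Int) > k then (pvHeappop (pvHeappush mh y)).2 else pvHeappush mh y,
           if ((pvHeappush xh (-y)).length : Int) > k then (pvHeappop (pvHeappush xh (-y))).2 else pvHeappush xh (-y)) := rfl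
    simp only [List.foldl_cons, List.map_cons, hstep]
    exact ih _ _ (pvStep k.toNat t1 y) (pvStep k.toNat t2 (-y)) a1 b1 a2 b2
      (pv_step_sorted _ _ _ hs1) (pv_step_sorted _ _ _ hs2)

-- crux: inserting into a sorted suffix commutes with taking the suffix
theorem pv_crux (d : Nat) (s : List Int) (x : Int) (hs : s.Pairwise (· ≤ ·)) :
    (List.orderedInsert (· ≤ ·) x (s.drop d)).tail = (List.orderedInsert (· ≤ ·) x s).drop (d + 1) := by
  induction d generalizing s with
  | zero =>
    rw [List.drop_zero, List.drop_one]
  | succ d ih =>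
    cases s with
    | nil => simp [List.orderedInsert]
    | cons y s' =>
      have hs' : s'.Pairwise (· ≤ ·) := (List.pairwise_cons.mp hs).2
      rw [List.drop_succ_cons]
      by_cases hxy : x ≤ y
      · rw [List.orderedInsert, if_pos hxy, List.drop_succ_cons, List.drop_succ_cons]
        cases hd : s'.drop d with
        | nil => simp [List.orderedInsert]
        | cons z w =>
          have hz : z ∈ s' := by
            have : z ∈ s'.drop d := by rw [hd]; exact List.mem_cons_self
            exact List.mem_of_mem_drop this
          have hyz : y ≤ z := (List.pairwise_cons.mp hs).1 z hz
          rw [List.orderedInsert, if_pos (le_trans hxy hyz)]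
          rfl
      · rw [List.orderedInsert, if_neg hxy, List.drop_succ_cons]
        exact ih s' hs'

theorem pv_model_eq (k : Nat) (hk : 1 ≤ k) (p : List Int) :
    p.foldl (pvStep k) [] = (List.insertionSort (· ≤ ·) p).drop (p.length - k) := by
  induction p using List.reverseRecOn with
  | nil => simp
  | append_singleton p x ih =>
    rw [List.foldl_append, List.foldl_cons, List.foldl_nil, ih]
    have hsort : (List.insertionSort (· ≤ ·) p).Pairwise (· ≤ ·) := List.pairwise_insertionSort _ p
    have hslen : (List.insertionSort (· ≤ ·) p).length = p.length := List.length_insertionSort _ p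
    have hnew : List.insertionSort (· ≤ ·) (p ++ [x])
        = List.orderedInsert (· ≤ ·) x (List.insertionSort (· ≤ ·) p) := by
      apply List.Perm.eq_of_pairwise (fun a b _ _ h1 h2 => le_antisymm h1 h2)
      · exact List.pairwise_insertionSort _ _
      · exact List.Pairwise.orderedInsert x _ hsort
      · exact (List.perm_insertionSort _ _).trans ((List.perm_append_singleton x p).trans
          (((List.perm_insertionSort _ p).symm.cons x).trans
            (List.perm_orderedInsert _ x _).symm))
    rw [hnew]
    simp only [List.length_append, List.length_cons, List.length_nil]
    unfold pvStep
    by_cases hm : p.length < k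
    · have h0 : p.length - k = 0 := by omega
      have h1 : p.length + 0 + 1 - k = 0 := by omega
      rw [h0, h1, List.drop_zero, List.drop_zero]
      have hul : (List.orderedInsert (· ≤ ·) x (List.insertionSort (· ≤ ·) p)).length = p.length + 1 := by
        simpa [hslen] using (List.perm_orderedInsert (· ≤ ·) x (List.insertionSort (· ≤ ·) p)).length_eq
      rw [if_neg (by omega)]
    · have hdl : ((List.insertionSort (· ≤ ·) p).drop (p.length - k)).length = k := by
        rw [List.length_drop, hslen]
        omega
      have hul : (List.orderedInsert (· ≤ ·) x ((List.insertionSort (· ≤ ·) p).drop (p.length - k))).length = k + 1 := by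
        simpa [hdl] using (List.perm_orderedInsert (· ≤ ·) x ((List.insertionSort (· ≤ ·) p).drop (p.length - k))).length_eq
      rw [if_pos (by omega)]
      rw [pv_crux (p.length - k) _ x hsort]
      congr 1
      omega

theorem pv_getD_drop (l : List Int) (m : Nat) : (l.drop m).getD 0 0 = l.getD m 0 := by
  simp [List.getD_eq_getElem?_getD, List.getElem?_drop]

-- sorting the negated list is reversing the negation of the sorted list
theorem pv_negsort (arr : List Int) :
    List.insertionSort (· ≤ ·) (arr.map (fun z => -z))
      = ((List.insertionSort (· ≤ ·) arr).map (fun z => -z)).reverse := by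
  apply List.Perm.eq_of_pairwise (fun a b _ _ h1 h2 => le_antisymm h1 h2)
  · exact List.pairwise_insertionSort _ _
  · rw [List.pairwise_reverse]
    exact List.Pairwise.map _ (fun a b hab => neg_le_neg hab) (List.pairwise_insertionSort _ arr)
  · exact (List.perm_insertionSort _ _).trans
      (((List.perm_insertionSort _ arr).symm.map _).trans (List.reverse_perm _).symm)

theorem pv_main (arr : List Int) (k : Int) (hcond : ¬(k < 1 ∨ k > (arr.length : Int))) :
    find_kth_largest_and_smallest arr k = find_kth_largest_and_smallest_alt arr k := by
  push Not at hcond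
  obtain ⟨hk1, hkn⟩ := hcond
  have hk1' : 1 ≤ k.toNat := by omega
  have hkn' : k.toNat ≤ arr.length := by omega
  have hn1 : 1 ≤ arr.length := by omega
  have hi0 : PVHeapInv [] := by
    intro i j hij hj
    simp at hj
  obtain ⟨I1, I2, M1, M2⟩ := pv_loop k hk1 arr [] [] [] [] hi0 hi0 rfl rfl
    List.Pairwise.nil List.Pairwise.nil
  rw [pv_model_eq k.toNat hk1' arr] at M1
  rw [pv_model_eq k.toNat hk1' (arr.map (fun z => -z))] at M2
  set S := List.insertionSort (· ≤ ·) arr with hSdef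
  set Sn := List.insertionSort (· ≤ ·) (arr.map (fun z => -z)) with hSndef
  have hSlen : S.length = arr.length := List.length_insertionSort _ arr
  have hSnlen : Sn.length = arr.length := by
    rw [hSndef, List.length_insertionSort, List.length_map]
  have hSsort : S.Pairwise (· ≤ ·) := List.pairwise_insertionSort _ arr
  have hSnsort : Sn.Pairwise (· ≤ ·) := List.pairwise_insertionSort _ _
  rw [List.length_map] at M2
  set r := arr.foldl (pvLoopStep k) ([], []) with hrdef
  -- lengths and non-emptiness of the two heaps
  have hlen1 : r.1.length = k.toNat := by
    rw [pv_len_eq_ms _ _ M1, List.length_drop, hSlen]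
    omega
  have hlen2 : r.2.length = k.toNat := by
    rw [pv_len_eq_ms _ _ M2, List.length_drop, hSnlen]
    omega
  have hne1 : r.1 ≠ [] := by
    intro he
    rw [he] at hlen1
    simp at hlen1
    omega
  have hne2 : r.2 ≠ [] := by
    intro he
    rw [he] at hlen2
    simp at hlen2
    omega
  -- the heap roots, via the sorted models
  have hroot1 : r.1.getD 0 0 = S.getD (arr.length - k.toNat) 0 := by
    rw [pv_root_eq r.1 (S.drop (arr.length - k.toNat)) I1 M1
      (List.Pairwise.sublist (List.drop_sublist _ _) hSsort) hne1]
    exact pv_getD_drop S (arr.length - k.toNat)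
  have hroot2 : r.2.getD 0 0 = Sn.getD (arr.length - k.toNat) 0 := by
    rw [pv_root_eq r.2 (Sn.drop (arr.length - k.toNat)) I2 M2
      (List.Pairwise.sublist (List.drop_sublist _ _) hSnsort) hne2]
    exact pv_getD_drop Sn (arr.length - k.toNat)
  -- the negated sorted list
  have hneg : Sn.getD (arr.length - k.toNat) 0 = -(S.getD (k.toNat - 1) 0) := by
    rw [hSndef, pv_negsort arr, ← hSdef]
    have hlt : arr.length - k.toNat < (S.map (fun z => -z)).length := by
      rw [List.length_map, hSlen]
      omega
    rw [pv_getD_eq_getElem _ _ (by simpa using hlt), List.getElem_reverse]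
    rw [List.getElem_map]
    have hidx : (S.map (fun z => -z)).length - 1 - (arr.length - k.toNat) = k.toNat - 1 := by
      rw [List.length_map, hSlen]
      omega
    congr 1
    simp only [hidx]
    rw [← pv_getD_eq_getElem S (k.toNat - 1) (by rw [hSlen]; omega)]
  -- evaluate the four indexings
  have heq1 : PySem.List.pyGet? r.1 0 = some (S.getD (arr.length - k.toNat) 0) := by
    rw [PySem.List.pyGet?_zero, List.getElem?_eq_getElem (by omega : 0 < r.1.length),
      ← pv_getD_eq_getElem r.1 0 (by omega), hroot1]
  have heq2 : PySem.List.pyGet? r.2 0 = some (-(S.getD (k.toNat - 1) 0)) := by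
    rw [PySem.List.pyGet?_zero, List.getElem?_eq_getElem (by omega : 0 < r.2.length),
      ← pv_getD_eq_getElem r.2 0 (by omega), hroot2, hneg]
  have hBsort : PySem.List.sorted arr (fun x => x) false = S :=
    PySem.List.sorted_id_eq_of_perm_of_pairwise arr S (List.perm_insertionSort _ arr) hSsort
  have heq3 : PySem.List.pyGet? S (((S.length : Int)) - k) = some (S.getD (arr.length - k.toNat) 0) := by
    rw [PySem.List.pyGet?_of_nonneg S (by rw [hSlen]; omega)]
    have hidx : ((S.length : Int) - k).toNat = arr.length - k.toNat := by
      rw [hSlen]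
      omega
    rw [hidx, List.getElem?_eq_getElem (by omega : arr.length - k.toNat < S.length),
      ← pv_getD_eq_getElem S _ (by omega)]
  have heq4 : PySem.List.pyGet? S (k - 1) = some (S.getD (k.toNat - 1) 0) := by
    rw [PySem.List.pyGet?_of_nonneg S (by omega)]
    have hidx : (k - 1).toNat = k.toNat - 1 := by omega
    rw [hidx, List.getElem?_eq_getElem (by rw [hSlen]; omega : k.toNat - 1 < S.length),
      ← pv_getD_eq_getElem S _ (by rw [hSlen]; omega)]
  unfold find_kth_largest_and_smallest find_kth_largest_and_smallest_alt
  rw [if_neg (by omega), if_neg (by omega)]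
  simp only [hBsort, ← hrdef, heq1, heq2, heq3, heq4]
  simp

-- ===== VERDICT (by name: the statement is the Claim_ definition above) =====
theorem find_kth_largest_and_smallest_spec : Claim_equal_find_kth_largest_and_smallest := by
  intro arr k _
  unfold Spec_find_kth_largest_and_smallest
  by_cases hcond : k < 1 ∨ k > (arr.length : Int)
  · unfold find_kth_largest_and_smallest find_kth_largest_and_smallest_alt
    rw [if_pos hcond, if_pos hcond]
  · exact pv_main arr k hcond
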